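-- pv_equiv track=rewrite | github.com/jdapaah/advent_of_code | 2019/d122.py | get_largest
-- ===== SOURCE A (Python) =====
-- def get_largest(longlist):
--     longlist = [i for i in longlist if i != 1]  # remove 1s
--     counter, num = 1, longlist[0]
--     for i in longlist:
--         curr_frequency = longlist.count(i)
--         if curr_frequency > counter:
--             counter = curr_frequency
--             num = i
--         if curr_frequency == counter:
--             num = max(num, i)
--     return num
-- ===== SOURCE B (Python) =====
-- def get_largest(longlist):
--     filtered = [i for i in longlist if i != 1]
--     counts = {}
--     for v in filtered:
--         counts[v] = counts.get(v, 0) + 1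
--     return max(counts, key=lambda v: (counts[v], v))
-- ===== Notes on version B (the rewrite author's own statement) =====
-- stated objective: faster
-- what changed: Replaces the quadratic loop that recomputes longlist.count(i) for every element with a single-pass frequency dictionary followed by one max over its keys with key (count, value).
import Mathlib
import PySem

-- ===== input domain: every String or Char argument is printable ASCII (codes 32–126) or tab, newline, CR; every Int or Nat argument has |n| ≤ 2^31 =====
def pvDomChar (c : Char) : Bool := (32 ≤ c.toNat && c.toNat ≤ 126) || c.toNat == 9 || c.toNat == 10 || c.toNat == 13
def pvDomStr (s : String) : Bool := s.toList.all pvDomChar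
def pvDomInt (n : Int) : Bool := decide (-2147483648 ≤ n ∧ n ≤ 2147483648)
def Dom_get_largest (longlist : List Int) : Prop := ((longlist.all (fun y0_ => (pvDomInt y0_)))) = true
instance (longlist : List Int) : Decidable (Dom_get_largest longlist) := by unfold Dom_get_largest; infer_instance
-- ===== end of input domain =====

-- B replaces A's loop that recomputes list.count for every element by a one-pass counter
-- dict plus one max over its keys keyed by (count, value); return values proved equal.

-- ===== PORT A =====
def get_largest (longlist : List Int) : Int :=
  let ll := longlist.filter (fun i => decide (i ≠ 1))
  match ll with
  | [] => 0  -- Python raises IndexError on longlist[0] here; excluded by Pre_get_largest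
  | first :: _ =>
    (ll.foldl (fun (s : Int × Int) i =>
        let cf : Int := ll.count i
        let s1 := if cf > s.1 then (cf, i) else s
        if cf = s1.1 then (s1.1, max s1.2 i) else s1) (1, first)).2

-- ===== PORT B =====
def get_largest_alt (longlist : List Int) : Int :=
  let filtered := longlist.filter (fun i => decide (i ≠ 1))
  let counts : PySem.Dict Int Int := filtered.foldl (fun d v => d.insert v (d.getD v 0 + 1)) PySem.Dict.empty
  -- Python's max raises ValueError on an empty dict; the .getD 0 default is unreachable under Pre_get_largest
  (PySem.List.max2? counts.keys (fun v => counts.getD v 0) (fun v => v)).getD 0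

-- ===== PRECONDITION & SPEC =====
-- Pre_ excludes exactly the inputs with no element ≠ 1, where A raises IndexError (and B raises ValueError).
def Pre_get_largest (longlist : List Int) : Prop :=
  longlist.any (fun i => decide (i ≠ 1)) = true
instance (longlist : List Int) : Decidable (Pre_get_largest longlist) := by
  unfold Pre_get_largest; infer_instance
def pvWitness_get_largest : List Int := [2, 3, 2, 1]

def Spec_get_largest (longlist : List Int) (out : Int) : Prop := out = get_largest_alt longlist
instance (longlist : List Int) (out : Int) : Decidable (Spec_get_largest longlist out) := by
  unfold Spec_get_largest; infer_instance

-- ===== CLAIM (what is proved, stated in full; the proofs are below) =====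
def Claim_equal_get_largest : Prop := ∀ (longlist : List Int), Dom_get_largest longlist → Pre_get_largest longlist → Spec_get_largest longlist (get_largest longlist)

-- ===== LEMMAS AND PROOFS =====

-- lexicographic dominance of a state (c, n) over a value v w.r.t. counts in ll
def lexDom (ll : List Int) (c n v : Int) : Prop :=
  (ll.count v : Int) < c ∨ ((ll.count v : Int) = c ∧ v ≤ n)

theorem lexDom_mono {ll : List Int} {c n c' n' v : Int}
    (h : lexDom ll c n v) (hc : c ≤ c') (hn : c = c' → n ≤ n') : lexDom ll c' n' v := by
  rcases h with h | ⟨h1, h2⟩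
  · exact Or.inl (lt_of_lt_of_le h hc)
  · rcases lt_or_eq_of_le hc with hlt | heq
    · exact Or.inl (h1 ▸ hlt)
    · exact Or.inr ⟨h1.trans heq, h2.trans (hn heq)⟩

-- A's loop invariant, generalized over the processed suffix p ⊆ ll
theorem pvAfold (ll : List Int) (p : List Int) (hp : ∀ v ∈ p, v ∈ ll) :
    ∀ (s : Int × Int), s.2 ∈ ll → s.1 ≤ (ll.count s.2 : Int) →
    ∀ (s' : Int × Int), s' = p.foldl (fun (s : Int × Int) i =>
        let cf : Int := ll.count i
        let s1 := if cf > s.1 then (cf, i) else s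
        if cf = s1.1 then (s1.1, max s1.2 i) else s1) s →
    s'.2 ∈ ll ∧ s'.1 ≤ (ll.count s'.2 : Int) ∧ s.1 ≤ s'.1 ∧ (s.1 = s'.1 → s.2 ≤ s'.2) ∧
      ∀ v ∈ p, lexDom ll s'.1 s'.2 v := by
  induction p with
  | nil =>
    intro s h1 h2 s' hs'
    rw [List.foldl_nil] at hs'
    subst hs'
    exact ⟨h1, h2, le_refl _, fun _ => le_refl _, by simp⟩
  | cons i t ih =>
    intro s hs1 hs2 s' hs'
    rw [List.foldl_cons] at hs'
    have hi : i ∈ ll := hp i (by simp)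
    have hit : ∀ v ∈ t, v ∈ ll := fun v hv => hp v (by simp [hv])
    set s1 : Int × Int := if (ll.count i : Int) > s.1 then ((ll.count i : Int), i) else s with hs1def
    set s2 : Int × Int := if (ll.count i : Int) = s1.1 then (s1.1, max s1.2 i) else s1 with hs2def
    have hstep : s2.2 ∈ ll ∧ s2.1 ≤ (ll.count s2.2 : Int) ∧ s.1 ≤ s2.1 ∧
        (s.1 = s2.1 → s.2 ≤ s2.2) ∧ lexDom ll s2.1 s2.2 i := by
      by_cases hgt : (ll.count i : Int) > s.1
      · have h1 : s1 = ((ll.count i : Int), i) := by simp [hs1def, hgt]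
        have h2 : s2 = ((ll.count i : Int), max i i) := by simp [hs2def, h1]
        refine ⟨by simp [h2, hi], by simp [h2], by simp [h2]; omega, ?_, ?_⟩
        · intro h; simp [h2] at h; omega
        · exact Or.inr ⟨by simp [h2], by simp [h2]⟩
      · have h1 : s1 = s := by simp [hs1def, hgt]
        by_cases heq : (ll.count i : Int) = s.1
        · have h2 : s2 = (s.1, max s.2 i) := by simp [hs2def, h1, heq]
          refine ⟨?_, ?_, by simp [h2], by intro _; simp [h2], ?_⟩
          · rcases max_cases s.2 i with ⟨hm, _⟩ | ⟨hm, _⟩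
            · simpa [h2, hm] using hs1
            · simpa [h2, hm] using hi
          · rcases max_cases s.2 i with ⟨hm, _⟩ | ⟨hm, _⟩
            · simpa [h2, hm] using hs2
            · simp [h2, hm]; omega
          · exact Or.inr ⟨by simp [h2, heq], by simp [h2]⟩
        · have h2 : s2 = s := by simp [hs2def, h1, heq]
          exact ⟨by simp [h2, hs1], by simp [h2, hs2], by simp [h2],
            by intro _; simp [h2], Or.inl (by simp [h2]; omega)⟩
    obtain ⟨k1, k2, k3, k4, k5⟩ := hstep
    obtain ⟨m1, m2, m3, m4, m5⟩ := ih hit s2 k1 k2 s' hs'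
    refine ⟨m1, m2, le_trans k3 m3, ?_, ?_⟩
    · intro h
      have h1 : s.1 = s2.1 := by omega
      exact le_trans (k4 h1) (m4 (by omega))
    · intro v hv
      rcases List.mem_cons.mp hv with rfl | hv
      · exact lexDom_mono k5 m3 m4
      · exact m5 v hv

-- lexicographic dominance between candidates for B's max, keyed by (k1 v, v)
def lexDomK (k1 : Int → Int) (a b : Int) : Prop := k1 b < k1 a ∨ (k1 b = k1 a ∧ b ≤ a)

theorem lexDomK_refl (k1 : Int → Int) (a : Int) : lexDomK k1 a a := Or.inr ⟨rfl, le_refl _⟩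

theorem lexDomK_trans {k1 : Int → Int} {a b c : Int}
    (h1 : lexDomK k1 a b) (h2 : lexDomK k1 b c) : lexDomK k1 a c := by
  rcases h1 with h1 | ⟨h1, h1'⟩ <;> rcases h2 with h2 | ⟨h2, h2'⟩
  · exact Or.inl (by omega)
  · exact Or.inl (by omega)
  · exact Or.inl (by omega)
  · exact Or.inr ⟨by omega, le_trans h2' h1'⟩

-- the pure running-max fold underlying max2? keeps a lexicographic maximum
theorem pvMaxFold (k1 : Int → Int) (t : List Int) :
    ∀ (m : Int),
    (let m' := t.foldl (fun m x => if k1 m < k1 x ∨ (¬ k1 x < k1 m ∧ m < x) then x else m) m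
    (m' = m ∨ m' ∈ t) ∧ lexDomK k1 m' m ∧ ∀ v ∈ t, lexDomK k1 m' v) := by
  induction t with
  | nil => intro m; exact ⟨Or.inl rfl, lexDomK_refl k1 m, by simp⟩
  | cons x t ih =>
    intro m
    simp only [List.foldl_cons]
    set m1 : Int := if k1 m < k1 x ∨ (¬ k1 x < k1 m ∧ m < x) then x else m with hm1
    have hstep : lexDomK k1 m1 m ∧ lexDomK k1 m1 x ∧ (m1 = m ∨ m1 = x) := by
      unfold lexDomK
      by_cases h : k1 m < k1 x ∨ (¬ k1 x < k1 m ∧ m < x)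
      · rw [hm1, if_pos h]
        exact ⟨by omega, by omega, Or.inr rfl⟩
      · rw [hm1, if_neg h]
        exact ⟨by omega, by omega, Or.inl rfl⟩
    obtain ⟨q1, q2, q3⟩ := hstep
    obtain ⟨w1, w2, w3⟩ := ih m1
    refine ⟨?_, lexDomK_trans w2 q1, ?_⟩
    · rcases w1 with hmm | hmm
      · rcases q3 with h3 | h3
        · exact Or.inl (hmm.trans h3)
        · right; rw [hmm, h3]; exact List.mem_cons_self
      · exact Or.inr (List.mem_cons_of_mem x hmm)
    · intro v hv
      rcases List.mem_cons.mp hv with rfl | hv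
      · exact lexDomK_trans w2 q2
      · exact w3 v hv

-- peeling one element off max2?: its option-state loop is the pure running-max fold
theorem pvMax2_cons (k1 : Int → Int) (t : List Int) :
    ∀ (m : Int),
    PySem.List.max2? (m :: t) k1 (fun v => v)
      = some (t.foldl (fun m x => if k1 m < k1 x ∨ (¬ k1 x < k1 m ∧ m < x) then x else m) m) := by
  induction t with
  | nil => intro m; rfl
  | cons x t ih =>
    intro m
    rw [List.foldl_cons]
    by_cases h : k1 m < k1 x ∨ (¬ k1 x < k1 m ∧ m < x)
    · rw [if_pos h, ← ih x]
      unfold PySem.List.max2?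
      simp only [List.foldl_cons]
      congr 1
      show (if (decide (k1 m < k1 x) || !decide (k1 x < k1 m) && decide (m < x)) = true
          then some x else some m) = some x
      have hb : (decide (k1 m < k1 x) || !decide (k1 x < k1 m) && decide (m < x)) = true := by
        simp only [Bool.or_eq_true, Bool.and_eq_true, Bool.not_eq_true', decide_eq_true_eq,
          decide_eq_false_iff_not]
        exact h
      rw [if_pos hb]
    · rw [if_neg h, ← ih m]
      unfold PySem.List.max2?
      simp only [List.foldl_cons]
      congr 1
      show (if (decide (k1 m < k1 x) || !decide (k1 x < k1 m) && decide (m < x)) = true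
          then some x else some m) = some m
      have hb : (decide (k1 m < k1 x) || !decide (k1 x < k1 m) && decide (m < x)) ≠ true := by
        simp only [ne_eq, Bool.or_eq_true, Bool.and_eq_true, Bool.not_eq_true', decide_eq_true_eq,
          decide_eq_false_iff_not]
        exact h
      rw [if_neg hb]

-- specification of max2? (first lexicographic maximum) on a nonempty list of Ints
theorem pvMax2 (k1 : Int → Int) (xs : List Int) (hx : xs ≠ []) :
    ∃ m, PySem.List.max2? xs k1 (fun v => v) = some m ∧ m ∈ xs ∧
      ∀ v ∈ xs, lexDomK k1 m v := by
  obtain ⟨x, t, rfl⟩ := List.exists_cons_of_ne_nil hx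
  rw [pvMax2_cons k1 t x]
  obtain ⟨w1, w2, w3⟩ := pvMaxFold k1 t x
  refine ⟨_, rfl, ?_, ?_⟩
  · rcases w1 with h | h
    · rw [h]; exact List.mem_cons_self
    · exact List.mem_cons_of_mem x h
  · intro v hv
    rcases List.mem_cons.mp hv with rfl | hv
    · exact w2
    · exact w3 v hv

-- ===== VERDICT (by name: the statement is the Claim_ definition above) =====
theorem get_largest_spec : Claim_equal_get_largest := by
  intro longlist _ hpre
  unfold Spec_get_largest
  obtain ⟨x0, hx0mem, hx0⟩ := List.any_eq_true.mp hpre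
  have hne0 : longlist.filter (fun i => decide (i ≠ 1)) ≠ [] := by
    intro h
    have hx0f : x0 ∈ longlist.filter (fun i => decide (i ≠ 1)) :=
      List.mem_filter.mpr ⟨hx0mem, hx0⟩
    rw [h] at hx0f
    exact (List.not_mem_nil) hx0f
  obtain ⟨x, t, hxt⟩ := List.exists_cons_of_ne_nil hne0
  -- A's value is the fold over the filtered list
  have hA : get_largest longlist = ((x :: t).foldl (fun (s : Int × Int) i =>
      let cf : Int := (x :: t).count i
      let s1 := if cf > s.1 then (cf, i) else s
      if cf = s1.1 then (s1.1, max s1.2 i) else s1) (1, x)).2 := by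
    unfold get_largest
    rw [hxt]
  -- B's value is the lexicographic max over the distinct elements of the filtered list
  have hB : get_largest_alt longlist = (PySem.List.max2? (PySem.Set.ofList (x :: t))
      (fun v => (((x :: t).count v : Nat) : Int)) (fun v => v)).getD 0 := by
    unfold get_largest_alt
    rw [hxt]
    show (PySem.List.max2?
        ((List.foldl (fun d v => d.insert v (d.getD v 0 + 1))
          (PySem.Dict.empty : PySem.Dict Int Int) (x :: t)).keys)
        (fun v => (List.foldl (fun d v => d.insert v (d.getD v 0 + 1))
          (PySem.Dict.empty : PySem.Dict Int Int) (x :: t)).getD v 0)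
        (fun v => v)).getD 0 = _
    rw [PySem.Dict.foldl_insert_getD_add_one_eq_counter, PySem.Dict.keys_counter,
      show (fun v => (PySem.Dict.counter (x :: t)).getD v 0)
          = fun v => (((x :: t).count v : Nat) : Int) from
        funext fun v => PySem.Dict.getD_counter _ v]
  -- B side: existence and maximality of the max2? result
  have hne : (PySem.Set.ofList (x :: t) : List Int) ≠ [] := by
    intro hnil
    have hxm : x ∈ PySem.Set.ofList (x :: t) := (PySem.Set.mem_ofList _ x).mpr List.mem_cons_self
    rw [hnil] at hxm
    exact (List.not_mem_nil) hxm
  obtain ⟨m, hm, hmmem, hmdom⟩ := pvMax2 (fun v => (((x :: t).count v : Nat) : Int))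
    (PySem.Set.ofList (x :: t)) hne
  have hmF : m ∈ x :: t := (PySem.Set.mem_ofList _ m).mp hmmem
  rw [hm, Option.getD_some] at hB
  -- A side: run the loop invariant on the whole filtered list
  have hx1 : (1 : Int) ≤ ((x :: t).count x : Int) := by
    have h := List.count_pos_iff.mpr (List.mem_cons_self (a := x) (l := t))
    omega
  set s' := (x :: t).foldl (fun (s : Int × Int) i =>
      let cf : Int := (x :: t).count i
      let s1 := if cf > s.1 then (cf, i) else s
      if cf = s1.1 then (s1.1, max s1.2 i) else s1) (1, x) with hs'
  obtain ⟨a1, a2, _, _, a5⟩ := pvAfold (x :: t) (x :: t) (fun v hv => hv) (1, x)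
    List.mem_cons_self hx1 s' hs'
  -- the final counter equals the count of the final value
  have hc : s'.1 = ((x :: t).count s'.2 : Int) := by
    rcases a5 s'.2 a1 with h | ⟨h, _⟩ <;> omega
  -- mutual lexicographic dominance gives equality
  have h1 : ((x :: t).count m : Int) < s'.1 ∨
      (((x :: t).count m : Int) = s'.1 ∧ m ≤ s'.2) := a5 m hmF
  have h2 : ((x :: t).count s'.2 : Int) < ((x :: t).count m : Int) ∨
      (((x :: t).count s'.2 : Int) = ((x :: t).count m : Int) ∧ s'.2 ≤ m) :=
    hmdom s'.2 ((PySem.Set.mem_ofList _ s'.2).mpr a1)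
  have hfinal : s'.2 = m := by
    rcases h1 with h1 | ⟨h1, h1'⟩ <;> rcases h2 with h2 | ⟨h2, h2'⟩ <;> omega
  rw [hA, hB]
  exact hfinal
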